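-- pv_equiv track=rewrite | github.com/Hecvi/computor_v1 | computor_v1.py | adding_coefficients
-- ===== SOURCE A (Python) =====
-- def adding_coefficients(tokens):
--     coeff = {'a': 0, 'b': 0, 'c': 0}
--     for key, value in tokens.items():
--         if key == 0:
--             coeff['c'] = value
--         elif key == 1:
--             coeff['b'] = value
--         elif key == 2:
--             coeff['a'] = value
--     return coeff
-- ===== SOURCE B (Python) =====
-- def adding_coefficients(tokens):
--     return {'a': tokens.get(2, 0), 'b': tokens.get(1, 0), 'c': tokens.get(0, 0)}
-- ===== Notes on version B (the rewrite author's own statement) =====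
-- stated objective: simpler
-- what changed: Replaces the loop over tokens with an if/elif chain (scatter) by a direct dict literal that fetches each of the three coefficients with tokens.get(key, 0) (gather).
import Mathlib
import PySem

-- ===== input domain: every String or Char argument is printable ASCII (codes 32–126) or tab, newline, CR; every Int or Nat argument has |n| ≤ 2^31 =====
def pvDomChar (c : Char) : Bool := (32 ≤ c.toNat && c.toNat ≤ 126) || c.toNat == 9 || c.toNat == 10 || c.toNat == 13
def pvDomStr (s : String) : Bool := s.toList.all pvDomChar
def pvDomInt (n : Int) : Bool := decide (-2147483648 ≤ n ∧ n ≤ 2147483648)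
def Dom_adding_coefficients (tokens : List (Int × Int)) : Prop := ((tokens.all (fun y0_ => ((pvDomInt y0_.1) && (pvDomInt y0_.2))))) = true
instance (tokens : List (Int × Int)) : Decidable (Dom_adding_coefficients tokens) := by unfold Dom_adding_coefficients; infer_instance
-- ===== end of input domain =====

-- B replaces A's loop-with-if/elif-chain (scatter into a preset dict) by a direct
-- dict literal gathering each coefficient with tokens.get(key, 0); same return value.

-- ===== PORT A =====
-- coeff = {'a': 0, 'b': 0, 'c': 0}; for key, value in tokens.items(): … ; return coeff
def adding_coefficients (tokens : List (Int × Int)) : List (String × Int) :=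
  (tokens.foldl
    (fun coeff kv =>
      if kv.1 == 0 then coeff.insert "c" kv.2
      else if kv.1 == 1 then coeff.insert "b" kv.2
      else if kv.1 == 2 then coeff.insert "a" kv.2
      else coeff)
    (PySem.Dict.ofList [("a", (0 : Int)), ("b", 0), ("c", 0)])).items

-- ===== PORT B =====
-- return {'a': tokens.get(2, 0), 'b': tokens.get(1, 0), 'c': tokens.get(0, 0)}
def adding_coefficients_alt (tokens : List (Int × Int)) : List (String × Int) :=
  [("a", (PySem.Dict.ofList tokens).getD 2 0),
   ("b", (PySem.Dict.ofList tokens).getD 1 0),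
   ("c", (PySem.Dict.ofList tokens).getD 0 0)]

-- ===== PRECONDITION & SPEC =====
def Spec_adding_coefficients (tokens : List (Int × Int)) (out : List (String × Int)) : Prop := out = adding_coefficients_alt tokens
instance (tokens : List (Int × Int)) (out : List (String × Int)) : Decidable (Spec_adding_coefficients tokens out) := by unfold Spec_adding_coefficients; infer_instance

-- ===== CLAIM (what is proved, stated in full; the proofs are below) =====
def Claim_equal_adding_coefficients : Prop := ∀ (tokens : List (Int × Int)), Dom_adding_coefficients tokens → Spec_adding_coefficients tokens (adding_coefficients tokens)

-- ===== LEMMAS AND PROOFS =====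

-- last-occurrence lookup: the value of the final pair in ts with key k, else d
def lastGetD (ts : List (Int × Int)) (k d : Int) : Int :=
  ts.foldl (fun acc kv => if kv.1 == k then kv.2 else acc) d

theorem getD_update_eq (ts : List (Int × Int)) (d0 : PySem.Dict Int Int) (k dflt : Int) :
    (d0.update ts).getD k dflt = lastGetD ts k (d0.getD k dflt) := by
  induction ts generalizing d0 with
  | nil => simp [PySem.Dict.update, lastGetD]
  | cons kv rest ih =>
    rw [show (d0.update (kv::rest)) = ((d0.insert kv.1 kv.2).update rest) from rfl, ih]
    simp only [lastGetD, List.foldl_cons]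
    rw [PySem.Dict.getD_insert]
    rcases eq_or_ne kv.1 k with h | h
    · simp [h]
    · simp [h, h.symm]

theorem ofList_getD_eq_lastGetD (ts : List (Int × Int)) (k d : Int) :
    (PySem.Dict.ofList ts).getD k d = lastGetD ts k d := by
  rw [PySem.Dict.ofList, getD_update_eq, PySem.Dict.getD_empty]

theorem foldl_items (ts : List (Int × Int)) (a b c : Int) :
    (ts.foldl
      (fun coeff kv =>
        if kv.1 == 0 then coeff.insert "c" kv.2
        else if kv.1 == 1 then coeff.insert "b" kv.2
        else if kv.1 == 2 then coeff.insert "a" kv.2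
        else coeff)
      (PySem.Dict.mk [("a", a), ("b", b), ("c", c)])).items
    = [("a", lastGetD ts 2 a), ("b", lastGetD ts 1 b), ("c", lastGetD ts 0 c)] := by
  induction ts generalizing a b c with
  | nil => simp [lastGetD]
  | cons kv rest ih =>
    simp only [List.foldl_cons, lastGetD, List.foldl_cons] at *
    by_cases h0 : kv.1 = 0
    · simpa [h0, PySem.Dict.insert, PySem.Dict.contains] using ih a b kv.2
    · by_cases h1 : kv.1 = 1
      · simpa [h1, PySem.Dict.insert, PySem.Dict.contains] using ih a kv.2 c
      · by_cases h2 : kv.1 = 2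
        · simpa [h2, PySem.Dict.insert, PySem.Dict.contains] using ih kv.2 b c
        · simpa [h0, h1, h2] using ih a b c

-- ===== VERDICT (by name: the statement is the Claim_ definition above) =====
theorem adding_coefficients_spec : Claim_equal_adding_coefficients := by
  intro tokens _
  unfold Spec_adding_coefficients adding_coefficients adding_coefficients_alt
  rw [show PySem.Dict.ofList [("a", (0 : Int)), ("b", 0), ("c", 0)]
        = PySem.Dict.mk [("a", (0 : Int)), ("b", 0), ("c", 0)] from by decide,
      foldl_items, ofList_getD_eq_lastGetD, ofList_getD_eq_lastGetD, ofList_getD_eq_lastGetD]
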